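-- pv_equiv track=rewrite | github.com/melinazik/crypto | ex6.py | listToBits
-- ===== SOURCE A (Python) =====
-- def listToBits(l):
--
--     binary = 0b0
--
--     for i in range(len(l)):
--         n = l[i]
--         binary = binary ^ n
--         binary = binary << 1
--
--     binary = binary >> 1
--     return binary
-- ===== SOURCE B (Python) =====
-- def listToBits(l):
--     binary = 0
--     shift = 0
--     for n in reversed(l):
--         binary ^= n << shift
--         shift += 1
--     return binary
-- ===== Notes on version B (the rewrite author's own statement) =====
-- stated objective: simpler
-- what changed: B replaces A's shift-and-correct accumulator (xor then left-shift the whole accumulator each step, with a trailing >>1 to undo the extra shift) by a positional XOR: it walks the list back-to-front with a shift counter and xors each element shifted directly into its final position, so no accumulator shifting and no final correction.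
import Mathlib
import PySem

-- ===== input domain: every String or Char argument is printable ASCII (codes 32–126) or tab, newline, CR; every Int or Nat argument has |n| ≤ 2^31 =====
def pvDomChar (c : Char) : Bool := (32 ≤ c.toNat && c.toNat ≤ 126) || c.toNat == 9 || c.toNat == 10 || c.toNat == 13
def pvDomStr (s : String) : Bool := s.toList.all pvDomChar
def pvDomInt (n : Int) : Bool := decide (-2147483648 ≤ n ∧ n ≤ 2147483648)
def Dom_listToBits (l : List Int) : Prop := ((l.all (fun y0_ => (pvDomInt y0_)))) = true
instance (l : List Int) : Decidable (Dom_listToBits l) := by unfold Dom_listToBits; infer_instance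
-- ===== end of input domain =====

-- B replaces A's shift-and-correct accumulator by a positional XOR over the reversed list with a shift counter (simpler: no per-step accumulator shift, no trailing >>1 correction).


-- ===== PORT A =====
-- binary = 0; for i in range(len(l)): n = l[i]; binary = binary ^ n; binary = binary << 1
-- binary = binary >> 1; return binary
-- (the index i produced by range(len(l)) is always in range, so pyGetD's default 0 is never used)
def listToBits (l : List Int) : Int :=
  ((PySem.List.pyRange 0 (l.length : Int) 1).foldl
      (fun binary i => (PySem.Int.bxor binary (PySem.List.pyGetD l i 0)) <<< (1:Nat)) 0)
    >>> (1:Nat)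

-- ===== PORT B =====
-- binary = 0; shift = 0; for n in reversed(l): binary ^= n << shift; shift += 1; return binary
-- (shift only ever holds 0,1,2,…, so it is carried as a Nat counter)
def listToBits_alt (l : List Int) : Int :=
  (l.reverse.foldl
    (fun (st : Int × Nat) (n : Int) => (PySem.Int.bxor st.1 (n <<< st.2), st.2 + 1))
    (0, 0)).1

-- ===== PRECONDITION & SPEC =====
def Spec_listToBits (l : List Int) (out : Int) : Prop := out = listToBits_alt l
instance (l : List Int) (out : Int) : Decidable (Spec_listToBits l out) := by unfold Spec_listToBits; infer_instance

-- ===== CLAIM (what is proved, stated in full; the proofs are below) =====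
def Claim_equal_listToBits : Prop := ∀ (l : List Int), Dom_listToBits l → Spec_listToBits l (listToBits l)

-- ===== LEMMAS AND PROOFS =====

-- bxor on the ofNat/negSucc representation reduces to Nat xor
theorem bxor_ofNat_ofNat (m n : Nat) :
    PySem.Int.bxor (m : Int) (n : Int) = ((m ^^^ n : Nat) : Int) := by
  simp [PySem.Int.bxor]

theorem bxor_ofNat_negSucc (m n : Nat) :
    PySem.Int.bxor (m : Int) (Int.negSucc n) = Int.negSucc (m ^^^ n) := by
  rw [PySem.Int.bxor]
  rw [if_pos (by positivity), if_neg (by simp [Int.negSucc_eq]; omega)]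
  have h1 : (-(Int.negSucc n) - 1).toNat = n := by simp [Int.negSucc_eq]
  have h2 : ((m:Int)).toNat = m := by simp
  rw [h1, h2, Int.negSucc_eq]; push_cast; ring

theorem bxor_negSucc_ofNat (m n : Nat) :
    PySem.Int.bxor (Int.negSucc m) (n : Int) = Int.negSucc (m ^^^ n) := by
  rw [PySem.Int.bxor]
  rw [if_neg (by simp [Int.negSucc_eq]; omega), if_pos (by positivity)]
  have h1 : (-(Int.negSucc m) - 1).toNat = m := by simp [Int.negSucc_eq]
  have h2 : ((n:Int)).toNat = n := by simp
  rw [h1, h2, Int.negSucc_eq]; push_cast; ring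

theorem bxor_negSucc_negSucc (m n : Nat) :
    PySem.Int.bxor (Int.negSucc m) (Int.negSucc n) = ((m ^^^ n : Nat) : Int) := by
  rw [PySem.Int.bxor]
  rw [if_neg (by simp [Int.negSucc_eq]; omega), if_neg (by simp [Int.negSucc_eq]; omega)]
  have h1 : (-(Int.negSucc m) - 1).toNat = m := by simp [Int.negSucc_eq]
  have h2 : (-(Int.negSucc n) - 1).toNat = n := by simp [Int.negSucc_eq]
  rw [h1, h2]

theorem bxor_assoc (a b c : Int) :
    PySem.Int.bxor (PySem.Int.bxor a b) c = PySem.Int.bxor a (PySem.Int.bxor b c) := by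
  rcases a with m | m <;> rcases b with n | n <;> rcases c with p | p <;>
    simp [Int.ofNat_eq_natCast, bxor_ofNat_ofNat, bxor_ofNat_negSucc, bxor_negSucc_ofNat,
      bxor_negSucc_negSucc, Nat.xor_assoc]

theorem nat_two_mul_xor_one (k : Nat) : (2*k) ^^^ 1 = 2*k+1 := by
  apply Nat.eq_of_testBit_eq
  intro i
  rcases i with _ | i <;> simp [Nat.testBit_succ, Nat.mul_comm 2 k, Nat.testBit_zero]

theorem nat_xor_two_mul (m n : Nat) : (2*m) ^^^ (2*n) = 2*(m ^^^ n) := by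
  have h : ∀ z : Nat, 2 * z = z <<< 1 := by intro z; simp [Nat.shiftLeft_eq, Nat.mul_comm]
  rw [h, h, h, Nat.shiftLeft_xor_distrib]

theorem nat_xor_two_mul_add_one (m n : Nat) : (2*m) ^^^ (2*n+1) = 2*(m ^^^ n)+1 := by
  rw [← nat_two_mul_xor_one n, ← Nat.xor_assoc, nat_xor_two_mul, nat_two_mul_xor_one]

theorem nat_xor_odd_odd (m n : Nat) : (2*m+1) ^^^ (2*n+1) = 2*(m ^^^ n) := by
  rw [← nat_two_mul_xor_one m, ← nat_two_mul_xor_one n]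
  rw [Nat.xor_assoc, Nat.xor_comm 1, Nat.xor_assoc, Nat.xor_self, Nat.xor_zero, nat_xor_two_mul]

theorem ofNat_mul_two (m : Nat) : ((m : Int)) * 2 = ((2*m : Nat) : Int) := by push_cast; ring

theorem negSucc_mul_two (m : Nat) : (Int.negSucc m) * 2 = Int.negSucc (2*m+1) := by
  simp [Int.negSucc_eq]; ring

theorem bxor_mul_two (a b : Int) :
    (PySem.Int.bxor a b) * 2 = PySem.Int.bxor (a*2) (b*2) := by
  rcases a with m | m <;> rcases b with n | n <;>
    simp only [Int.ofNat_eq_natCast, bxor_ofNat_ofNat, bxor_ofNat_negSucc, bxor_negSucc_ofNat,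
      bxor_negSucc_negSucc, ofNat_mul_two, negSucc_mul_two]
  · rw [nat_xor_two_mul]
  · rw [nat_xor_two_mul_add_one]
  · rw [Nat.xor_comm (2*m+1), nat_xor_two_mul_add_one, Nat.xor_comm n m]
  · rw [nat_xor_odd_odd]

theorem bxor_shiftLeft (a b : Int) (n : Nat) :
    (PySem.Int.bxor a b) <<< n = PySem.Int.bxor (a <<< n) (b <<< n) := by
  induction n with
  | zero => simp [Int.shiftLeft_eq]
  | succ k ih =>
    have h : ∀ z : Int, z <<< (k+1) = (z <<< k) * 2 := by
      intro z; rw [Int.shiftLeft_eq, Int.shiftLeft_eq, pow_succ]; ring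
    rw [h, h, h, ih, bxor_mul_two]

theorem shl_one_shr_one (a : Int) : (a <<< (1:Nat)) >>> (1:Nat) = a := by
  have h : a <<< (1:Nat) = a * 2 := by rw [Int.shiftLeft_eq]; ring
  rw [h]
  rcases a with m | m
  · rw [Int.ofNat_eq_natCast, ofNat_mul_two, ← Int.ofNat_eq_natCast]
    show Int.ofNat ((2*m) >>> 1) = Int.ofNat m
    congr 1; simp [Nat.shiftRight_succ]
  · rw [negSucc_mul_two]
    show Int.negSucc ((2*m+1) >>> 1) = Int.negSucc m
    congr 1; simp [Nat.shiftRight_succ]; omega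

theorem zero_shiftLeft' (n : Nat) : (0 : Int) <<< n = 0 := by rw [Int.shiftLeft_eq]; ring

theorem bxor_zero_left (a : Int) : PySem.Int.bxor 0 a = a := by
  rw [PySem.Int.bxor_comm, PySem.Int.bxor_zero]

-- the common value both programs compute: XOR of l[i] shifted left by (len l - 1 - i)
def posXor : List Int → Int
  | [] => 0
  | n :: t => PySem.Int.bxor (n <<< t.length) (posXor t)

theorem foldlA_eq (l : List Int) (b : Int) :
    l.foldl (fun binary n => (PySem.Int.bxor binary n) <<< (1:Nat)) b
      = PySem.Int.bxor (b <<< l.length) (posXor l <<< (1:Nat)) := by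
  induction l generalizing b with
  | nil => simp [posXor, Int.shiftLeft_eq, PySem.Int.bxor_zero]
  | cons n t ih =>
    simp only [List.foldl_cons, ih, List.length_cons, posXor]
    rw [← Int.shiftLeft_add, Nat.add_comm 1 t.length, bxor_shiftLeft b n (t.length+1),
      bxor_shiftLeft (n <<< t.length) (posXor t) 1, ← Int.shiftLeft_add, bxor_assoc]

-- revXor s r: XOR of r[j] shifted left by (s + j)
def revXor : Nat → List Int → Int
  | _, [] => 0
  | s, n :: t => PySem.Int.bxor (n <<< s) (revXor (s+1) t)

theorem foldlB_eq (r : List Int) (b : Int) (s : Nat) :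
    (r.foldl (fun (st : Int × Nat) (n : Int) => (PySem.Int.bxor st.1 (n <<< st.2), st.2 + 1)) (b, s)).1
      = PySem.Int.bxor b (revXor s r) := by
  induction r generalizing b s with
  | nil => simp [revXor, PySem.Int.bxor_zero]
  | cons n t ih => simp only [List.foldl_cons, ih, revXor, bxor_assoc]

theorem revXor_append (xs ys : List Int) (s : Nat) :
    revXor s (xs ++ ys) = PySem.Int.bxor (revXor s xs) (revXor (s + xs.length) ys) := by
  induction xs generalizing s with
  | nil => simp [revXor, bxor_zero_left]
  | cons n t ih =>
    simp only [List.cons_append, revXor, ih, List.length_cons, bxor_assoc]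
    have h : s + 1 + t.length = s + (t.length + 1) := by omega
    rw [h]

theorem posXor_eq_revXor_reverse (l : List Int) : posXor l = revXor 0 l.reverse := by
  induction l with
  | nil => rfl
  | cons n t ih =>
    simp only [posXor, List.reverse_cons, revXor_append, ← ih, List.length_reverse, Nat.zero_add]
    simp only [revXor, PySem.Int.bxor_zero]
    rw [PySem.Int.bxor_comm]

theorem listToBits_eq_posXor (l : List Int) : listToBits l = posXor l := by
  unfold listToBits
  rw [PySem.List.foldl_pyRange_pyGetD' l 0
    (fun binary n => (PySem.Int.bxor binary n) <<< (1:Nat)) 0 (by omega)]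
  simp only [Int.toNat_zero, List.drop_zero]
  rw [foldlA_eq, zero_shiftLeft', bxor_zero_left, shl_one_shr_one]

theorem listToBits_alt_eq_posXor (l : List Int) : listToBits_alt l = posXor l := by
  unfold listToBits_alt
  rw [foldlB_eq, bxor_zero_left, ← posXor_eq_revXor_reverse]

-- ===== VERDICT (by name: the statement is the Claim_ definition above) =====
theorem listToBits_spec : Claim_equal_listToBits := by
  intro l _
  unfold Spec_listToBits
  rw [listToBits_eq_posXor, listToBits_alt_eq_posXor]
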